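-- pv_equiv track=rewrite | github.com/Terukio/aoc2022 | day3.py | shared_item
-- ===== SOURCE A (Python) =====
-- def compartmentalize(rucksack):
--     compartment1 = rucksack[:len(rucksack) // 2]
--     compartment2 = rucksack[len(rucksack) // 2:]
--     return compartment1,compartment2
--
-- def shared_item(rucksack):
--     compartment1,compartment2 = compartmentalize(rucksack)
--     shared_items = ''
--     for item in compartment1:
--         if item in compartment2:
--             shared_items += item
--             break
--     return shared_items
-- ===== SOURCE B (Python) =====
-- def shared_item(rucksack):
--     half = len(rucksack) // 2
--     c1, c2 = rucksack[:half], rucksack[half:]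
--     common = set(c1) & set(c2)
--     if not common:
--         return ''
--     return min(common, key=c1.index)
-- ===== Notes on version B (the rewrite author's own statement) =====
-- stated objective: alternative
-- what changed: Replaces A's in-order scan-with-break over the first compartment by a two-phase computation: build the set intersection of the two compartments, then select the intersection element with the smallest index in the first compartment (empty intersection gives '').
import Mathlib
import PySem

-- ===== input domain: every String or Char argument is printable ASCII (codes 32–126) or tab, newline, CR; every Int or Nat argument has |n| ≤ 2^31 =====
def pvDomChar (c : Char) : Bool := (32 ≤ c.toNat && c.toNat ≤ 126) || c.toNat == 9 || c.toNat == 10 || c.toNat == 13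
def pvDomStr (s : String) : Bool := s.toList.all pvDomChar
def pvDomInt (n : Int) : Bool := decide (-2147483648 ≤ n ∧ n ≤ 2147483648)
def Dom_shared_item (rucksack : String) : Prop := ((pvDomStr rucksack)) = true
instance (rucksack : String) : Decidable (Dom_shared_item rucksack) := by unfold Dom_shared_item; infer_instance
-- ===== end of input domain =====

-- B replaces A's in-order scan-with-break by set-intersection + min-by-index selection (alternative decomposition, same cost).

-- ===== PORT A =====
-- the for-loop with break: first char of c1 that occurs in c2 ('item in compartment2' on a
-- single char is Python substring test = membership)
def pvLoopA (c2 : List Char) : List Char → List Char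
  | [] => []
  | item :: rest => if item ∈ c2 then [item] else pvLoopA c2 rest

def shared_item (rucksack : String) : String :=
  let l := rucksack.toList
  let n : Int := PySem.Int.floordiv (l.length : Int) 2   -- len(rucksack) // 2
  let compartment1 := PySem.List.slice l none (some n)
  let compartment2 := PySem.List.slice l (some n) none
  String.ofList (pvLoopA compartment2 compartment1)

-- ===== PORT B =====
def shared_item_alt (rucksack : String) : String :=
  let l := rucksack.toList
  let half : Int := PySem.Int.floordiv (l.length : Int) 2
  let c1 := PySem.List.slice l none (some half)
  let c2 := PySem.List.slice l (some half) none
  let common : PySem.Set Char := PySem.Set.inter (PySem.Set.ofList c1) (PySem.Set.ofList c2)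
  -- min(common, key=c1.index); every member of common is in c1, so index? is some (.getD 0 unreachable)
  match PySem.List.min? common (fun c => (PySem.List.index? c1 c).getD 0) with
  | none => ""            -- empty intersection: ''
  | some c => String.ofList [c]

-- ===== PRECONDITION & SPEC =====
def Spec_shared_item (rucksack : String) (out : String) : Prop := out = shared_item_alt rucksack
instance (rucksack : String) (out : String) : Decidable (Spec_shared_item rucksack out) := by unfold Spec_shared_item; infer_instance

-- ===== CLAIM (what is proved, stated in full; the proofs are below) =====
def Claim_equal_shared_item : Prop := ∀ (rucksack : String), Dom_shared_item rucksack → Spec_shared_item rucksack (shared_item rucksack)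

-- ===== LEMMAS AND PROOFS =====

lemma pvLoopA_eq_find? (c2 c1 : List Char) :
    pvLoopA c2 c1 = ((c1.find? (fun c => decide (c ∈ c2))).elim [] (fun c => [c])) := by
  induction c1 with
  | nil => rfl
  | cons x t ih =>
    by_cases hx : x ∈ c2 <;> simp [pvLoopA, List.find?, hx, ih]

lemma pv_main (c1 c2 : List Char) :
    pvLoopA c2 c1 =
      (match PySem.List.min? (PySem.Set.inter (PySem.Set.ofList c1) (PySem.Set.ofList c2))
          (fun c => (PySem.List.index? c1 c).getD 0) with
        | none => []
        | some c => [c]) := by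
  rw [pvLoopA_eq_find?]
  cases h : c1.find? (fun c => decide (c ∈ c2)) with
  | none =>
    rw [List.find?_eq_none] at h
    have hempty : PySem.Set.inter (PySem.Set.ofList c1) (PySem.Set.ofList c2) = [] := by
      rw [List.eq_nil_iff_forall_not_mem]
      intro x hx
      rcases (PySem.Set.mem_inter _ _ _).mp hx with ⟨hx1, hx2⟩
      have hx1' := h x ((PySem.Set.mem_ofList _ _).mp hx1)
      simp at hx1'
      exact hx1' ((PySem.Set.mem_ofList _ _).mp hx2)
    rw [hempty]
    simp [(PySem.List.min?_eq_none_iff ([] : List Char) _).mpr rfl]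
  | some m =>
    rw [List.find?_eq_some_iff_append] at h
    obtain ⟨hpm, as, bs, hc1, hall⟩ := h
    subst hc1
    have hm2 : m ∈ c2 := by simpa using hpm
    have hall' : ∀ a ∈ as, a ∉ c2 := by
      intro a ha
      have := hall a ha
      simpa using this
    have hmas : m ∉ as := fun ha => hall' m ha hm2
    have hm1 : m ∈ as ++ m :: bs := by simp
    have hidx : PySem.List.index? (as ++ m :: bs) m = some as.length :=
      (PySem.List.index?_eq_some_iff _ m as.length).mpr ⟨as, bs, rfl, rfl, hmas⟩
    have hmcom : m ∈ PySem.Set.inter (PySem.Set.ofList (as ++ m :: bs)) (PySem.Set.ofList c2) :=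
      (PySem.Set.mem_inter _ _ _).mpr ⟨(PySem.Set.mem_ofList _ _).mpr hm1, (PySem.Set.mem_ofList _ _).mpr hm2⟩
    cases hmin : PySem.List.min? (PySem.Set.inter (PySem.Set.ofList (as ++ m :: bs)) (PySem.Set.ofList c2))
        (fun c => (PySem.List.index? (as ++ m :: bs) c).getD 0) with
    | none =>
      rw [PySem.List.min?_eq_none_iff] at hmin
      rw [hmin] at hmcom
      exact absurd hmcom (List.not_mem_nil)
    | some m' =>
      have hm'com := PySem.List.min?_mem hmin
      rcases (PySem.Set.mem_inter _ _ _).mp hm'com with ⟨hm'1, hm'2⟩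
      have hm'1 : m' ∈ as ++ m :: bs := (PySem.Set.mem_ofList _ _).mp hm'1
      have hm'2 : m' ∈ c2 := (PySem.Set.mem_ofList _ _).mp hm'2
      have hle : (PySem.List.index? (as ++ m :: bs) m').getD 0 ≤ (PySem.List.index? (as ++ m :: bs) m).getD 0 :=
        PySem.List.min?_isMin hmin m hmcom
      obtain ⟨k', hk'⟩ := Option.isSome_iff_exists.mp ((PySem.List.index?_isSome_iff _ m').mpr hm'1)
      obtain ⟨hk'lt, hget, -⟩ := PySem.List.getElem_of_index?_eq_some hk'
      -- positions before as.length hold elements of as, none of which are in c2, so as.length ≤ k'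
      have hge : as.length ≤ k' := by
        by_contra hlt
        rw [Nat.not_le] at hlt
        have heq : as[k']'hlt = m' := by
          rw [← hget]
          exact (List.getElem_append_left hlt).symm
        exact hall' _ (heq ▸ List.getElem_mem hlt) hm'2
      have hkeq : k' = as.length := by
        rw [hidx, hk'] at hle
        simp at hle
        omega
      have hmm' : m' = m := by
        rw [← hget]
        subst hkeq
        rw [List.getElem_append_right (le_refl as.length)]
        simp
      rw [hmm']
      rfl

lemma pv_main_str (c1 c2 : List Char) :
    String.ofList (pvLoopA c2 c1) =
      (match PySem.List.min? (PySem.Set.inter (PySem.Set.ofList c1) (PySem.Set.ofList c2))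
          (fun c => (PySem.List.index? c1 c).getD 0) with
        | none => ""
        | some c => String.ofList [c]) := by
  rw [pv_main]
  cases h : PySem.List.min? (PySem.Set.inter (PySem.Set.ofList c1) (PySem.Set.ofList c2))
      (fun c => (PySem.List.index? c1 c).getD 0) <;> rfl

-- ===== VERDICT (by name: the statement is the Claim_ definition above) =====
theorem shared_item_spec : Claim_equal_shared_item := by
  intro r _
  unfold Spec_shared_item shared_item shared_item_alt
  exact pv_main_str _ _
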